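-- pv_equiv track=rewrite | github.com/sgregoryy/dijkstra-floyd | dejkstra_floyd.py | steps_matrix_creation
-- ===== SOURCE A (Python) =====
-- def steps_matrix_creation(length):# ну тут просто вроде
--     matrix = []
--     for i in range(0, length):
--         temp = []
--         for j in range(0, length):
--             k = lambda j = j: j+1 if j != i else 0 #залупа просто индексацию делает с 1, там где i=j ставит 0
--             temp.append(k(j))
--         matrix.append(temp)
--     return matrix
-- ===== SOURCE B (Python) =====
-- def steps_matrix_creation(length):
--     base = list(range(1, length + 1))
--     matrix = []
--     for i in range(length):
--         row = base[:]
--         row[i] = 0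
--         matrix.append(row)
--     return matrix
-- ===== Notes on version B (the rewrite author's own statement) =====
-- stated objective: simpler
-- what changed: Replaces the per-cell conditional lambda inside A's nested loops with a precomputed ascending base row that is copied once per row and patched at the diagonal position, removing the inner per-element loop and lambda call.
import Mathlib
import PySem

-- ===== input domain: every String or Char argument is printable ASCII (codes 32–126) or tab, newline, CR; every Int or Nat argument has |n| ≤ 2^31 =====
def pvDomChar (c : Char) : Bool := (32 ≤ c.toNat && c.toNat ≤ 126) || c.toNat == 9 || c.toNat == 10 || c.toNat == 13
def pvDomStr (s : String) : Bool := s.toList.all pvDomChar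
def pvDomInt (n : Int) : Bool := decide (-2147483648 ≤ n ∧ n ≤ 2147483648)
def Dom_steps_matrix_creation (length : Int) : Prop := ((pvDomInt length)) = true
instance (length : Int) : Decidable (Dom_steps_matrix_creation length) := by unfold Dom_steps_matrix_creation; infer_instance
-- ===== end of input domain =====

-- B replaces A's per-cell conditional in a nested loop with a precomputed base row copied and patched at the diagonal per row.
-- ===== PORT A =====
def steps_matrix_creation (length : Int) : List (List Int) :=
  (PySem.List.pyRange 0 length 1).foldl (fun matrix i =>
    matrix ++ [(PySem.List.pyRange 0 length 1).foldl (fun temp j =>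
      temp ++ [if j != i then j + 1 else 0]) []]) []

-- ===== PORT B =====
def steps_matrix_creation_alt (length : Int) : List (List Int) :=
  let base := PySem.List.pyRange 1 (length + 1) 1
  (PySem.List.pyRange 0 length 1).foldl (fun matrix i =>
    matrix ++ [(base.set i.toNat 0)]) []

-- ===== PRECONDITION & SPEC =====
def Spec_steps_matrix_creation (length : Int) (out : List (List Int)) : Prop := out = steps_matrix_creation_alt length
instance (length : Int) (out : List (List Int)) : Decidable (Spec_steps_matrix_creation length out) := by unfold Spec_steps_matrix_creation; infer_instance

-- ===== CLAIM (what is proved, stated in full; the proofs are below) =====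
def Claim_equal_steps_matrix_creation : Prop := ∀ (length : Int), Dom_steps_matrix_creation length → Spec_steps_matrix_creation length (steps_matrix_creation length)

-- ===== LEMMAS AND PROOFS =====

-- ===== VERDICT (by name: the statement is the Claim_ definition above) =====
lemma foldl_snoc_map {α β : Type} (f : α → β) :
    ∀ (l : List α) (init : List β),
      l.foldl (fun acc x => acc ++ [f x]) init = init ++ l.map f := by
  intro l
  induction l with
  | nil => simp
  | cons x xs ih => intro init; simp [List.foldl, ih]

lemma row_eq (length i : Int) (hi0 : 0 ≤ i) (hi : i < length) :
    (PySem.List.pyRange 0 length 1).map (fun j => if j != i then j + 1 else 0)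
      = (PySem.List.pyRange 1 (length + 1) 1).set i.toNat 0 := by
  rw [PySem.List.pyRange_one 0 length, PySem.List.pyRange_one 1 (length + 1)]
  apply List.ext_getElem
  · simp
  · intro k h1 h2
    simp only [List.getElem_map, List.getElem_set, List.getElem_range] at *
    by_cases hk : k = i.toNat
    · subst hk
      simp
      omega
    · have h : ((0 : Int) + (k : Int)) ≠ i := by omega
      simp
      omega

theorem steps_matrix_creation_spec : Claim_equal_steps_matrix_creation := by
  intro length _
  unfold Spec_steps_matrix_creation steps_matrix_creation steps_matrix_creation_alt
  rw [foldl_snoc_map, foldl_snoc_map]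
  simp only [List.nil_append]
  apply List.map_congr_left
  intro i hi
  rw [PySem.List.mem_pyRange_one] at hi
  rw [foldl_snoc_map]
  simp only [List.nil_append]
  exact row_eq length i hi.1 hi.2
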